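-- pv_equiv track=rewrite | github.com/benjaminhuth/acts-gsf-scripts | gsf_debugger/gsf_debugger.py | groupLogToSteps
-- ===== SOURCE A (Python) =====
-- import copy
--
-- def groupLogToSteps(lines):
--     steps = []
--
--     current_step = []
--     for line in lines:
--         # TODO this is maybe not super reliable and also highly GSF specific
--         if line.count("at mean position") == 1:
--             steps.append(copy.deepcopy(current_step))
--             current_step = []
--
--         current_step.append(line)
--
--     return steps
-- ===== SOURCE B (Python) =====
-- import copy
--
-- def groupLogToSteps(lines):
--     marks = [i for i, line in enumerate(lines) if line.count("at mean position") == 1]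
--     return [copy.deepcopy(lines[s:e]) for s, e in zip([0] + marks, marks)]
-- ===== Notes on version B (the rewrite author's own statement) =====
-- stated objective: alternative
-- what changed: Replaces A's single-pass accumulator (append current group on each marker, drop the trailing one implicitly) by first collecting all marker indices and then emitting each group as a slice between consecutive boundaries.
import Mathlib
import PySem

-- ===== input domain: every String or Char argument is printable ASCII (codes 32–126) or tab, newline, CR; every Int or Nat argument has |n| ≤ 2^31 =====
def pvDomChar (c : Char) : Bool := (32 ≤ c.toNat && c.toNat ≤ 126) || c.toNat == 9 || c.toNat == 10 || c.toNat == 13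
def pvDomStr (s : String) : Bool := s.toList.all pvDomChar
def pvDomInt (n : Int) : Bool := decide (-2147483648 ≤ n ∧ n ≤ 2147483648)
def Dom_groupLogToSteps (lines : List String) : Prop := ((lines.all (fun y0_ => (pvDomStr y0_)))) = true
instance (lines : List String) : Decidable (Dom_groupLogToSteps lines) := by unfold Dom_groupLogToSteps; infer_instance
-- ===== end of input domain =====

-- B collects the marker indices first and emits each group as a slice between
-- consecutive boundaries, instead of A's single-pass accumulator; return values agree. (objective: alternative)

-- ===== PORT A =====
-- the marker test `line.count("at mean position") == 1`, shared verbatim by both Pythons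
def pvMark (l : String) : Bool := PySem.Str.count l "at mean position" == 1

def groupLogToSteps (lines : List String) : List (List String) :=
  (lines.foldl
    (fun (st : List (List String) × List String) line =>
      let st :=
        if pvMark line then
          (st.1 ++ [st.2], ([] : List String))
        else st
      (st.1, st.2 ++ [line]))
    (([] : List (List String)), ([] : List String))).1

-- ===== PORT B =====
-- Source B's `marks` list comprehension, as a named helper
def pvMarksB (lines : List String) : List Int :=
  ((PySem.List.enumerate lines 0).filter (fun p => pvMark p.2)).map (·.1)

def groupLogToSteps_alt (lines : List String) : List (List String) :=
  (List.zip ((0 : Int) :: pvMarksB lines) (pvMarksB lines)).map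
    (fun p => PySem.List.slice lines (some p.1) (some p.2))

-- ===== PRECONDITION & SPEC =====
def Spec_groupLogToSteps (lines : List String) (out : List (List String)) : Prop := out = groupLogToSteps_alt lines
instance (lines : List String) (out : List (List String)) : Decidable (Spec_groupLogToSteps lines out) := by unfold Spec_groupLogToSteps; infer_instance

-- ===== CLAIM (what is proved, stated in full; the proofs are below) =====
def Claim_equal_groupLogToSteps : Prop := ∀ (lines : List String), Dom_groupLogToSteps lines → Spec_groupLogToSteps lines (groupLogToSteps lines)

-- ===== LEMMAS AND PROOFS =====

-- reference segmentation: groups between markers, front group kept, trailing dropped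
def pvSeg (cur : List String) : List String → List (List String)
  | [] => []
  | l :: ls => if pvMark l then cur :: pvSeg [l] ls else pvSeg (cur ++ [l]) ls

-- marker indices, Nat version
def pvMarks (s : Nat) : List String → List Nat
  | [] => []
  | l :: ls => if pvMark l then s :: pvMarks (s + 1) ls else pvMarks (s + 1) ls

theorem pvMarks_ge (ls : List String) : ∀ (s m : Nat), m ∈ pvMarks s ls → s ≤ m := by
  induction ls with
  | nil => intro s m h; simp [pvMarks] at h
  | cons l ls ih =>
    intro s m h
    simp only [pvMarks] at h
    split at h
    · rcases List.mem_cons.mp h with h | h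
      · omega
      · have := ih (s + 1) m h; omega
    · have := ih (s + 1) m h; omega

theorem pvEnum_marks (ls : List String) : ∀ (s : Nat),
    ((PySem.List.enumerate ls (s : Int)).filter
      (fun p => pvMark p.2)).map (·.1)
    = (pvMarks s ls).map (fun n : Nat => (n : Int)) := by
  induction ls with
  | nil => intro s; simp [PySem.List.enumerate_nil, pvMarks]
  | cons l ls ih =>
    intro s
    have h1 : ((s : Int) + 1) = ((s + 1 : Nat) : Int) := by push_cast; ring
    rw [PySem.List.enumerate_cons, h1]
    by_cases h : pvMark l
    · simp only [pvMarks, h, if_true, List.filter_cons, List.map_cons, ih (s + 1)]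
    · simp only [pvMarks, h, if_false, Bool.false_eq_true, List.filter_cons,
        ih (s + 1)]

theorem pvA_go (ls : List String) : ∀ (steps : List (List String)) (cur : List String),
    (ls.foldl
      (fun (st : List (List String) × List String) line =>
        let st :=
          if pvMark line then
            (st.1 ++ [st.2], ([] : List String))
          else st
        (st.1, st.2 ++ [line])) (steps, cur)).1
    = steps ++ pvSeg cur ls := by
  induction ls with
  | nil => intro steps cur; simp [pvSeg]
  | cons l ls ih =>
    intro steps cur
    simp only [List.foldl_cons]
    by_cases h : pvMark l
    · simp [h, ih, pvSeg]
    · simp [h, ih, pvSeg]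

-- key bridge: the segmentation equals slice-between-boundaries on the full list
theorem pvKey (ls : List String) : ∀ (pre cur : List String),
    pvSeg cur ls
    = ((List.zip (pre.length :: pvMarks pre.length ls) (pvMarks pre.length ls)).map
        (fun p : Nat × Nat => (((pre ++ ls).drop p.1).take (p.2 - p.1)))).modifyHead
        (fun g => cur ++ g) := by
  induction ls with
  | nil => intro pre cur; simp [pvSeg, pvMarks]
  | cons l ls ih =>
    intro pre cur
    have hdrop : (pre ++ l :: ls).drop pre.length = l :: ls := by
      simp
    have hdrop1 : (pre ++ l :: ls).drop (pre.length + 1) = ls := by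
      rw [show pre.length + 1 = ((pre ++ [l]).length) by simp,
          show pre ++ l :: ls = (pre ++ [l]) ++ ls by simp]
      simp [List.drop_append]
    have hstep : ∀ m : Nat, pre.length + 1 ≤ m →
        ((pre ++ l :: ls).drop pre.length).take (m - pre.length)
        = l :: ((pre ++ l :: ls).drop (pre.length + 1)).take (m - (pre.length + 1)) := by
      intro m hm
      rw [hdrop, hdrop1, show m - pre.length = (m - (pre.length + 1)) + 1 by omega]
      simp
    have hpre1 : (pre ++ [l]).length = pre.length + 1 := by simp
    have hfull : (pre ++ [l]) ++ ls = pre ++ l :: ls := by simp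
    simp only [pvSeg, pvMarks]
    split
    · -- marker line
      rw [ih (pre ++ [l]) [l], hpre1, hfull]
      cases hM : pvMarks (pre.length + 1) ls with
      | nil => simp [List.zip]
      | cons m0 M =>
        have hm0 : pre.length + 1 ≤ m0 := by
          apply pvMarks_ge ls (pre.length + 1) m0; rw [hM]; exact List.mem_cons_self
        simp only [List.zip_cons_cons, List.map_cons, List.modifyHead_cons]
        rw [hstep m0 hm0]
        simp
    · -- non-marker line
      rw [ih (pre ++ [l]) (cur ++ [l]), hpre1, hfull]
      cases hM : pvMarks (pre.length + 1) ls with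
      | nil => simp [List.zip]
      | cons m0 M =>
        have hm0 : pre.length + 1 ≤ m0 := by
          apply pvMarks_ge ls (pre.length + 1) m0; rw [hM]; exact List.mem_cons_self
        simp only [List.zip_cons_cons, List.map_cons, List.modifyHead_cons]
        rw [hstep m0 hm0]
        simp

theorem pvAlt_eq (lines : List String) :
    groupLogToSteps_alt lines
    = (List.zip (0 :: pvMarks 0 lines) (pvMarks 0 lines)).map
        (fun p : Nat × Nat => ((lines.drop p.1).take (p.2 - p.1))) := by
  have e := pvEnum_marks lines 0
  norm_num at e
  unfold groupLogToSteps_alt pvMarksB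
  rw [e]
  rw [show (0 : Int) :: (pvMarks 0 lines).map (fun n : Nat => (n : Int))
      = ((0 :: pvMarks 0 lines).map (fun n : Nat => (n : Int))) from by simp]
  rw [List.zip_map, List.map_map]
  apply List.map_congr_left
  intro p _
  simp [PySem.List.slice_natCast]

-- ===== VERDICT (by name: the statement is the Claim_ definition above) =====
theorem pvModifyHead_nil (L : List (List String)) :
    L.modifyHead (fun g => ([] : List String) ++ g) = L := by
  cases L <;> simp

theorem groupLogToSteps_spec : Claim_equal_groupLogToSteps := by
  intro lines _
  unfold Spec_groupLogToSteps groupLogToSteps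
  rw [pvA_go lines [] [], List.nil_append, pvAlt_eq,
      pvKey lines [] [], pvModifyHead_nil]
  simp
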